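-- pv_equiv track=rewrite | github.com/PeterOjum/Learnpython | learnpy1.py | dups_lol
-- ===== SOURCE A (Python) =====
-- def dups_lol(matrix):
--     items = []
--     for row in matrix:
--         for item in row:
--             if item in items:
--                 return True
--             else:
--                 items.append(item)
--     return False
-- ===== SOURCE B (Python) =====
-- def dups_lol(matrix):
--     flat = [x for row in matrix for x in row]
--     return len(flat) != len(set(flat))
-- ===== Notes on version B (the rewrite author's own statement) =====
-- stated objective: simpler
-- what changed: Replaces A's nested loops with incremental list-membership tests and an early return by a single flatten followed by comparing the flat length with the set (deduplicated) length.
import Mathlib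
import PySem

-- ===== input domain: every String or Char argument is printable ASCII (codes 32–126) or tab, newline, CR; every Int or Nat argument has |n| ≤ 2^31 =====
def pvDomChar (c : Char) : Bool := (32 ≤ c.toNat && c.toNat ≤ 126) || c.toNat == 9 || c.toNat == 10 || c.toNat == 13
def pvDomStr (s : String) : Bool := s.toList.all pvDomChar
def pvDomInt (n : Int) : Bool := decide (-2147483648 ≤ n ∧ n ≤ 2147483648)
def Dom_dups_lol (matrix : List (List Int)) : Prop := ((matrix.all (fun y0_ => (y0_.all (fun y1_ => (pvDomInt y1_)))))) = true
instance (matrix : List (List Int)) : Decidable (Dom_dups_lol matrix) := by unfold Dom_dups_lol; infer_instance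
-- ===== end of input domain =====

-- B flattens the matrix once and compares the flat count with the set (dedup) count,
-- replacing A's nested loops with incremental membership tests and early return (objective: simpler).

-- ===== PORT A =====
-- inner loop: 'for item in row: if item in items: return True else items.append(item)';
-- none = the early 'return True', some items' = fall through with the grown items list
def dupsInner (items : List Int) : List Int → Option (List Int)
  | [] => some items
  | x :: xs => if x ∈ items then none else dupsInner (items ++ [x]) xs

-- outer loop over the rows, threading the items accumulator
def dupsOuter (items : List Int) : List (List Int) → Bool
  | [] => false
  | r :: rs =>
    match dupsInner items r with
    | none => true
    | some items' => dupsOuter items' rs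

def dups_lol (matrix : List (List Int)) : Bool := dupsOuter [] matrix

-- ===== PORT B =====
def dups_lol_alt (matrix : List (List Int)) : Bool :=
  let flat := matrix.flatMap (fun row => row)
  decide (flat.length ≠ (PySem.Set.ofList flat).length)

-- ===== PRECONDITION & SPEC =====
def Spec_dups_lol (matrix : List (List Int)) (out : Bool) : Prop := out = dups_lol_alt matrix
instance (matrix : List (List Int)) (out : Bool) : Decidable (Spec_dups_lol matrix out) := by unfold Spec_dups_lol; infer_instance

-- ===== CLAIM (what is proved, stated in full; the proofs are below) =====
def Claim_equal_dups_lol : Prop := ∀ (matrix : List (List Int)), Dom_dups_lol matrix → Spec_dups_lol matrix (dups_lol matrix)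

-- ===== LEMMAS AND PROOFS =====

lemma dupsInner_char (r : List Int) : ∀ (items : List Int), items.Nodup →
    dupsInner items r = if (items ++ r).Nodup then some (items ++ r) else none := by
  induction r with
  | nil => intro items h; simp [dupsInner, h]
  | cons x xs ih =>
    intro items h
    by_cases hx : x ∈ items
    · have hne : ¬ (items ++ x :: xs).Nodup := by
        intro hn
        rw [List.nodup_append] at hn
        exact hn.2.2 x hx x (by simp) rfl
      simp [dupsInner, hx, hne]
    · have hnd : (items ++ [x]).Nodup := by
        rw [List.nodup_append]
        refine ⟨h, List.nodup_singleton x, ?_⟩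
        intro a ha b hb
        simp only [List.mem_singleton] at hb
        subst hb
        exact fun hax => hx (hax ▸ ha)
      have hih := ih (items ++ [x]) hnd
      rw [List.append_assoc, List.singleton_append] at hih
      simp only [dupsInner, hx, if_false]
      exact hih

lemma dupsOuter_char (rs : List (List Int)) : ∀ (items : List Int), items.Nodup →
    dupsOuter items rs = !(items ++ rs.flatten).Nodup := by
  induction rs with
  | nil => intro items h; simp [dupsOuter, h]
  | cons r rs ih =>
    intro items h
    rw [dupsOuter, dupsInner_char r items h]
    by_cases hnd : (items ++ r).Nodup
    · rw [if_pos hnd]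
      show dupsOuter (items ++ r) rs = _
      rw [ih (items ++ r) hnd]
      simp [List.append_assoc]
    · rw [if_neg hnd]
      show true = _
      have hne : ¬ (items ++ (r ++ rs.flatten)).Nodup := by
        intro hh
        apply hnd
        have hsub : List.Sublist (items ++ r) (items ++ (r ++ rs.flatten)) := by
          rw [← List.append_assoc]
          exact List.sublist_append_left _ _
        exact hh.sublist hsub
      simp [hne]

lemma ofList_len_lt {xs : List Int} (h : ¬ xs.Nodup) :
    (PySem.Set.ofList xs).length < xs.length := by
  induction xs with
  | nil => simp at h
  | cons x xs ih =>
    rw [PySem.Set.ofList_cons]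
    by_cases hx : x ∈ xs
    · by_cases hnd : xs.Nodup
      · have hmem : x ∈ PySem.Set.ofList xs := (PySem.Set.mem_ofList xs x).2 hx
        have : (PySem.Set.discard (PySem.Set.ofList xs) x).length
            < (PySem.Set.ofList xs).length := by
          unfold PySem.Set.discard
          apply List.length_filter_lt_length_iff_exists.2
          exact ⟨x, hmem, by simp⟩
        have hle := PySem.Set.length_ofList_le xs
        simp only [List.length_cons]
        omega
      · have hlt := ih hnd
        have : (PySem.Set.discard (PySem.Set.ofList xs) x).length
            ≤ (PySem.Set.ofList xs).length := by
          unfold PySem.Set.discard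
          exact List.length_filter_le _ _
        simp only [List.length_cons]
        omega
    · have hnd : ¬ xs.Nodup := by
        intro hn; exact h (by simp [List.nodup_cons, hx, hn])
      have hlt := ih hnd
      have : (PySem.Set.discard (PySem.Set.ofList xs) x).length
          ≤ (PySem.Set.ofList xs).length := by
        unfold PySem.Set.discard
        exact List.length_filter_le _ _
      simp only [List.length_cons]
      omega

lemma alt_eq_not_nodup (matrix : List (List Int)) :
    dups_lol_alt matrix = !matrix.flatten.Nodup := by
  have h1 : dups_lol_alt matrix =
      decide ((matrix.flatMap (fun row => row)).length ≠
        (PySem.Set.ofList (matrix.flatMap (fun row => row))).length) := rfl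
  have h2 : matrix.flatMap (fun row => row) = matrix.flatten := by simp
  rw [h1, h2]
  by_cases h : matrix.flatten.Nodup
  · rw [PySem.Set.ofList_eq_self_of_nodup _ h]
    simp [h]
  · have hlt := ofList_len_lt h
    simp only [h, decide_false, Bool.not_false, decide_eq_true_eq]
    omega

-- ===== VERDICT (by name: the statement is the Claim_ definition above) =====
theorem dups_lol_spec : Claim_equal_dups_lol := by
  intro matrix _
  unfold Spec_dups_lol dups_lol
  rw [alt_eq_not_nodup, dupsOuter_char matrix [] (by simp)]
  simp
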